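-- pv_equiv track=rewrite | github.com/samuelfujie/LintCode | 89_k_Sum/solution.py | kSum
-- ===== SOURCE A (Python) =====
-- import collections
--
-- def kSum(A, k, target):
--     # dp[i][j][t]: in first (i) number we pick (j) numbres whose sum is (t)
--     # dp[i][j][t] = dp[i - 1][j][t] + dp[i - 1][j - 1][t - num[i]]
--     dp = collections.defaultdict(lambda: collections.defaultdict(lambda: collections.defaultdict(int)))
--     dp[0][0][0] = 1
--
--     A.sort()
--     # from the first 1 to n numbers
--     for i in range(1, len(A) + 1):
--         # we selected 0 to k of them
--         for j in range(min(i + 1, k + 1)):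
--             # whose sum is 0 to target
--             for t in range(target + 1):
--                 current_num = A[i-1]
--                 dp[i][j][t] = dp[i-1][j][t] + dp[i-1][j-1][t-current_num]
--
--     # return select k number in array whose sum is target
--     return dp[len(A)][k][target]
-- ===== SOURCE B (Python) =====
-- def kSum(A, k, target):
--     # Sparse forward DP: one pass over the (sorted) elements, keeping a dict
--     # cur[(j, t)] = number of j-subsets of the processed prefix whose sum is t,
--     # tracking only reachable states inside the window 0 <= j <= k, 0 <= t <= target.
--     # A.sort() kept: it mutates the argument like A does, and with the [0, target]
--     # window on intermediate sums the element order affects the count.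
--     A.sort()
--     cur = {(0, 0): 1}
--     for a in A:
--         nxt = {}
--         for (j, t), c in cur.items():
--             nxt[(j, t)] = nxt.get((j, t), 0) + c          # skip a
--             if j + 1 <= k and 0 <= t + a <= target:       # take a
--                 key = (j + 1, t + a)
--                 nxt[key] = nxt.get(key, 0) + c
--         cur = nxt
--     return cur.get((k, target), 0)
-- ===== Notes on version B (the rewrite author's own statement) =====
-- stated objective: alternative
-- what changed: Replaces A's dense bottom-up 3-D DP table (triple nested index loops over all i x j x t ranges in nested defaultdicts) by a one-pass forward DP that keeps a dict of only the reachable (j, t) states of the processed prefix and pushes each state's count to its skip/take successor states.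
import Mathlib
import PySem

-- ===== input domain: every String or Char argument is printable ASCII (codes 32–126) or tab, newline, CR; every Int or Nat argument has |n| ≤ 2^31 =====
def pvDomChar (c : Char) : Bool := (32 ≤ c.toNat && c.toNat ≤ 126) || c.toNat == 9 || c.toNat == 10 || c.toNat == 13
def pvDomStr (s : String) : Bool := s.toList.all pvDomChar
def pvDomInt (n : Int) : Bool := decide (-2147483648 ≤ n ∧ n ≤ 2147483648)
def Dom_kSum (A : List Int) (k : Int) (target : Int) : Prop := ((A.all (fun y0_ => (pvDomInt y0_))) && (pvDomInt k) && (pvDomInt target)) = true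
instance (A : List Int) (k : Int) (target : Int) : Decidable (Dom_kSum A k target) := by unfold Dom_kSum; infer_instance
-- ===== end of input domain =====

-- B replaces A's dense 3-D index-range DP table by a sparse one-pass forward DP over a dict of
-- reachable (j, t) states; equivalence is about the RETURN value only (A sorts its argument in
-- place; the Python B performs the same mutation).


-- ===== PORT A =====
-- The nested defaultdicts are modeled as ONE dict keyed by the index triple (i, j, t); an absent
-- key reads as 0, exactly the defaultdict default (the 0-valued entries that defaultdict reads
-- insert as a side effect never change the value of any later read).
def kSum (A : List Int) (k : Int) (target : Int) : Int :=
  let As := PySem.List.sorted A (fun x => x) false   -- A.sort() (in-place in Python)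
  let n : Int := As.length
  let dp0 : PySem.Dict (Int × Int × Int) Int := PySem.Dict.empty.insert (0, 0, 0) 1
  let dp := (PySem.List.pyRange 1 (n + 1) 1).foldl (fun dp i =>
    (PySem.List.pyRange 0 (min (i + 1) (k + 1)) 1).foldl (fun dp j =>
      (PySem.List.pyRange 0 (target + 1) 1).foldl (fun dp t =>
        let cn := PySem.List.pyGetD As (i - 1) 0    -- A[i-1]; in range: 1 ≤ i ≤ len(A)
        dp.insert (i, j, t) (dp.getD (i - 1, j, t) 0 + dp.getD (i - 1, j - 1, t - cn) 0)) dp) dp) dp0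
  dp.getD (n, k, target) 0

-- ===== PORT B =====
-- one element step: fold over cur.items, adding each state's count to its 'skip' and (inside
-- the window) 'take' successor states in nxt
def kSumStep (k target a : Int) (cur : PySem.Dict (Int × Int) Int) : PySem.Dict (Int × Int) Int :=
  cur.items.foldl (fun nxt p =>
    let j := p.1.1
    let t := p.1.2
    let c := p.2
    let nxt1 := nxt.insert (j, t) (nxt.getD (j, t) 0 + c)
    if j + 1 ≤ k ∧ 0 ≤ t + a ∧ t + a ≤ target then
      nxt1.insert (j + 1, t + a) (nxt1.getD (j + 1, t + a) 0 + c)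
    else nxt1) PySem.Dict.empty

def kSum_alt (A : List Int) (k : Int) (target : Int) : Int :=
  let As := PySem.List.sorted A (fun x => x) false   -- A.sort() (in-place in Python)
  let cur := As.foldl (fun cur a => kSumStep k target a cur) (PySem.Dict.empty.insert (0, 0) 1)
  cur.getD (k, target) 0

-- ===== PRECONDITION & SPEC =====
def Spec_kSum (A : List Int) (k : Int) (target : Int) (out : Int) : Prop := out = kSum_alt A k target
instance (A : List Int) (k : Int) (target : Int) (out : Int) : Decidable (Spec_kSum A k target out) := by unfold Spec_kSum; infer_instance

-- ===== CLAIM (what is proved, stated in full; the proofs are below) =====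
def Claim_equal_kSum : Prop := ∀ (A : List Int) (k : Int) (target : Int), Dom_kSum A k target → Spec_kSum A k target (kSum A k target)

-- ===== LEMMAS AND PROOFS =====

-- the common recurrence both programs compute: number of ways to pick j of the first i elements
-- of As summing to t, every intermediate sum kept inside the window [0, target]
def kCount (As : List Int) (target : Int) : Nat → Int → Int → Int
  | 0, j, t => if j < 0 ∨ t < 0 ∨ target < t then 0 else if j = 0 ∧ t = 0 then 1 else 0
  | i + 1, j, t => if j < 0 ∨ t < 0 ∨ target < t then 0
      else kCount As target i j t + kCount As target i (j - 1) (t - PySem.List.pyGetD As (i : Int) 0)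

lemma kCount_eq_zero_of_lt (As : List Int) (target : Int) :
    ∀ (i : Nat) (j t : Int), (i : Int) < j → kCount As target i j t = 0 := by
  intro i
  induction i with
  | zero => intro j t h; simp only [kCount]; split_ifs with h1 h2 <;> first | rfl | omega
  | succ i ih =>
    intro j t h
    simp only [kCount]
    split_ifs with h1
    · rfl
    · rw [ih j t (by push_cast at h ⊢; omega), ih (j - 1) _ (by push_cast at h ⊢; omega)]; rfl

lemma kCount_guard (As : List Int) (target : Int) (i : Nat) (j t : Int)
    (h : j < 0 ∨ t < 0 ∨ target < t) : kCount As target i j t = 0 := by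
  cases i <;> simp only [kCount] <;> rw [if_pos h]

lemma kCount_zero_zero (As : List Int) (target : Int) (ht : 0 ≤ target) :
    ∀ i : Nat, kCount As target i 0 0 = 1 := by
  intro i
  induction i with
  | zero => simp only [kCount]; rw [if_neg (by omega)]; simp
  | succ i ih =>
    simp only [kCount]
    rw [if_neg (by omega),
      kCount_guard As target i (0 - 1) (0 - PySem.List.pyGetD As (i : Int) 0) (by omega), ih]
    omega

-- the contents of A's dense table after the first m outer iterations
def Val (As : List Int) (k target : Int) (m : Nat) (a b c : Int) : Int :=
  if a = 0 ∧ b = 0 ∧ c = 0 then 1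
  else if 1 ≤ a ∧ a ≤ (m : Int) ∧ 0 ≤ b ∧ b ≤ min a k ∧ 0 ≤ c ∧ c ≤ target then
    kCount As target a.toNat b c
  else 0

-- innermost t-loop: writes exactly the keys (iI, jI, t) for t ∈ ts, reading row iI-1 (untouched)
lemma foldT (cn iI jI : Int) (ts : List Int) :
    ∀ (dp : PySem.Dict (Int × Int × Int) Int) (a b c : Int),
      ((ts.foldl (fun dp t =>
          dp.insert (iI, jI, t) (dp.getD (iI - 1, jI, t) 0 + dp.getD (iI - 1, jI - 1, t - cn) 0)) dp).getD
        (a, b, c) 0)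
      = if a = iI ∧ b = jI ∧ c ∈ ts then
          dp.getD (iI - 1, jI, c) 0 + dp.getD (iI - 1, jI - 1, c - cn) 0
        else dp.getD (a, b, c) 0 := by
  induction ts with
  | nil => intro dp a b c; simp
  | cons t ts ih =>
    intro dp a b c
    rw [List.foldl_cons, ih]
    have hrow : ∀ (b' c' : Int) (v : Int),
        ((dp.insert (iI, jI, t) v).getD (iI - 1, b', c') 0) = dp.getD (iI - 1, b', c') 0 := by
      intro b' c' v
      rw [PySem.Dict.getD_insert]
      rw [if_neg (by intro h; injection h with h1 _; omega)]
    rw [hrow, hrow]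
    rw [PySem.Dict.getD_insert (d := dp) (k := (iI, jI, t))]
    by_cases ha : a = iI
    · by_cases hb : b = jI
      · subst ha hb
        by_cases hc : c ∈ ts
        · rw [if_pos ⟨rfl, rfl, hc⟩, if_pos ⟨rfl, rfl, List.mem_cons_of_mem _ hc⟩]
        · by_cases hct : c = t
          · subst hct
            rw [if_neg (by simp [hc]), if_pos rfl, if_pos ⟨rfl, rfl, List.mem_cons_self⟩]
          · rw [if_neg (by simp [hc]), if_neg (by simp [Prod.ext_iff, hct]),
              if_neg (by simp [hc, hct])]
      · rw [if_neg (by simp [hb]), if_neg (by simp [Prod.ext_iff, hb]), if_neg (by simp [hb])]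
    · rw [if_neg (by simp [ha]), if_neg (by simp [Prod.ext_iff, ha]), if_neg (by simp [ha])]

-- middle j-loop
lemma foldJ (cn iI T : Int) (js : List Int) :
    ∀ (dp : PySem.Dict (Int × Int × Int) Int) (a b c : Int),
      ((js.foldl (fun dp j =>
          (PySem.List.pyRange 0 (T + 1) 1).foldl (fun dp t =>
            dp.insert (iI, j, t) (dp.getD (iI - 1, j, t) 0 + dp.getD (iI - 1, j - 1, t - cn) 0)) dp) dp).getD
        (a, b, c) 0)
      = if a = iI ∧ b ∈ js ∧ 0 ≤ c ∧ c < T + 1 then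
          dp.getD (iI - 1, b, c) 0 + dp.getD (iI - 1, b - 1, c - cn) 0
        else dp.getD (a, b, c) 0 := by
  induction js with
  | nil => intro dp a b c; simp
  | cons j js ih =>
    intro dp a b c
    rw [List.foldl_cons, ih]
    have hrow : ∀ (b' c' : Int),
        (((PySem.List.pyRange 0 (T + 1) 1).foldl (fun dp t =>
            dp.insert (iI, j, t) (dp.getD (iI - 1, j, t) 0 + dp.getD (iI - 1, j - 1, t - cn) 0)) dp).getD
          (iI - 1, b', c') 0) = dp.getD (iI - 1, b', c') 0 := by
      intro b' c'
      rw [foldT, if_neg (by rintro ⟨h1, -⟩; omega)]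
    rw [hrow, hrow, foldT]
    simp only [PySem.List.mem_pyRange_one, List.mem_cons]
    by_cases ha : a = iI
    · subst ha
      by_cases hw : 0 ≤ c ∧ c < T + 1
      · by_cases hbs : b ∈ js
        · rw [if_pos ⟨rfl, hbs, hw⟩, if_pos ⟨rfl, Or.inr hbs, hw.1, hw.2⟩]
        · by_cases hbj : b = j
          · subst hbj
            rw [if_neg (by tauto), if_pos ⟨rfl, rfl, hw⟩, if_pos ⟨rfl, Or.inl rfl, hw.1, hw.2⟩]
          · rw [if_neg (by tauto), if_neg (by tauto), if_neg (by tauto)]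
      · rw [if_neg (by tauto), if_neg (by tauto), if_neg (by tauto)]
    · rw [if_neg (by tauto), if_neg (by tauto), if_neg (by tauto)]

-- reading A's table row m at the keys the (m+1)-st outer iteration reads gives kCount
lemma val_read (As : List Int) (k target : Int) (m : Nat) (b c : Int)
    (ht : 0 ≤ target) (hb1 : b ≤ (m : Int) + 1) (hb2 : b ≤ k) :
    Val As k target m (m : Int) b c = kCount As target m b c := by
  unfold Val
  by_cases h1 : (m : Int) = 0 ∧ b = 0 ∧ c = 0
  · rw [if_pos h1]
    obtain ⟨hm, hb, hc⟩ := h1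
    have hm0 : m = 0 := by exact_mod_cast hm
    subst hm0 hb hc
    simp only [kCount]
    rw [if_neg (by omega)]
    simp
  · rw [if_neg h1]
    by_cases h2 : 1 ≤ (m : Int) ∧ (m : Int) ≤ (m : Int) ∧ 0 ≤ b ∧ b ≤ min (m : Int) k ∧ 0 ≤ c ∧ c ≤ target
    · rw [if_pos h2]; simp
    · rw [if_neg h2]
      by_cases hg : b < 0 ∨ c < 0 ∨ target < c
      · rw [kCount_guard As target m b c hg]
      · by_cases hbm : (m : Int) < b
        · rw [kCount_eq_zero_of_lt As target m b c hbm]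
        · have hm0 : m = 0 := by
            by_contra hm
            exact h2 ⟨by omega, le_refl _, by omega, by simp only [le_min_iff]; omega, by omega, by omega⟩
          subst hm0
          simp only [kCount]
          rw [if_neg hg, if_neg (by simp only [Nat.cast_zero] at h1; tauto)]

-- one outer step rewrites Val m into Val (m+1)
lemma val_step (As : List Int) (k target : Int) (m : Nat) (a b c : Int) :
    (if a = (m : Int) + 1 ∧ (0 ≤ b ∧ b < min ((m : Int) + 1 + 1) (k + 1)) ∧ 0 ≤ c ∧ c < target + 1 then
        Val As k target m ((m : Int) + 1 - 1) b c
          + Val As k target m ((m : Int) + 1 - 1) (b - 1) (c - PySem.List.pyGetD As ((m : Int) + 1 - 1) 0)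
      else Val As k target m a b c)
    = Val As k target (m + 1) a b c := by
  have e1 : (m : Int) + 1 - 1 = (m : Int) := by omega
  rw [e1]
  by_cases ha : a = (m : Int) + 1
  · subst ha
    by_cases hw : (0 ≤ b ∧ b < min ((m : Int) + 1 + 1) (k + 1)) ∧ 0 ≤ c ∧ c < target + 1
    · rw [if_pos ⟨rfl, hw⟩]
      have hw' := hw
      simp only [lt_min_iff] at hw'
      have ht : 0 ≤ target := by omega
      rw [val_read As k target m b c ht (by omega) (by omega),
          val_read As k target m (b - 1) (c - PySem.List.pyGetD As (m : Int) 0) ht (by omega) (by omega)]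
      unfold Val
      rw [if_neg (by rintro ⟨h, -⟩; omega),
          if_pos (by refine ⟨by omega, by push_cast; omega, by omega, by simp only [le_min_iff]; omega, by omega, by omega⟩)]
      have h2 : ((m : Int) + 1).toNat = m + 1 := by omega
      rw [h2]
      simp only [kCount]
      rw [if_neg (by omega)]
    · rw [if_neg (by tauto)]
      unfold Val
      rw [if_neg (by rintro ⟨h, -⟩; omega), if_neg (by rintro ⟨-, h, -⟩; omega),
          if_neg (by rintro ⟨h, -⟩; omega)]
      rw [if_neg (by
        rintro ⟨-, -, h3, h4, h5, h6⟩
        simp only [le_min_iff] at h4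
        simp only [lt_min_iff] at hw
        exact hw ⟨⟨h3, by omega, by omega⟩, h5, by omega⟩)]
  · rw [if_neg (by tauto)]
    unfold Val
    split_ifs <;> first | rfl | (exfalso; omega)

-- A's table after m outer iterations
lemma rowFold (As : List Int) (k target : Int) :
    ∀ (m : Nat) (a b c : Int),
      (((PySem.List.pyRange 1 ((m : Int) + 1) 1).foldl (fun dp i =>
          (PySem.List.pyRange 0 (min (i + 1) (k + 1)) 1).foldl (fun dp j =>
            (PySem.List.pyRange 0 (target + 1) 1).foldl (fun dp t =>
              dp.insert (i, j, t) (dp.getD (i - 1, j, t) 0 + dp.getD (i - 1, j - 1, t - PySem.List.pyGetD As (i - 1) 0) 0)) dp) dp)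
        (PySem.Dict.empty.insert (0, 0, 0) 1)).getD (a, b, c) 0)
      = Val As k target m a b c := by
  intro m
  induction m with
  | zero =>
    intro a b c
    rw [show ((0 : Nat) : Int) + 1 = 1 from by norm_num]
    rw [PySem.List.pyRange_one_eq_nil le_rfl, List.foldl_nil, PySem.Dict.getD_insert]
    simp only [Prod.mk.injEq, PySem.Dict.getD_empty]
    unfold Val
    split_ifs <;> first | rfl | tauto | (exfalso; omega)
  | succ m ih =>
    intro a b c
    have hcast : ((m + 1 : Nat) : Int) + 1 = ((m : Int) + 1) + 1 := by push_cast; ring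
    rw [hcast, PySem.List.pyRange_one_succ_right (a := 1) (b := (m : Int) + 1) (by omega),
      List.foldl_append, List.foldl_cons, List.foldl_nil, foldJ]
    simp only [PySem.List.mem_pyRange_one, ih]
    exact val_step As k target m a b c

-- what A's port returns, in terms of Val
lemma kSum_eq (A : List Int) (k target : Int) :
    kSum A k target
      = Val (PySem.List.sorted A (fun x => x) false) k target
          (PySem.List.sorted A (fun x => x) false).length
          (((PySem.List.sorted A (fun x => x) false).length : Int)) k target := by
  simp only [kSum]
  exact rowFold (PySem.List.sorted A (fun x => x) false) k target
    (PySem.List.sorted A (fun x => x) false).length _ k target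

-- ---- B side ----

lemma sum_if_key_zero (l : List ((Int × Int) × Int)) (x : Int × Int)
    (h : ∀ p ∈ l, p.1 ≠ x) :
    (l.map (fun p => if x = p.1 then p.2 else 0)).sum = 0 := by
  induction l with
  | nil => rfl
  | cons p l ih =>
    rw [List.map_cons, List.sum_cons, if_neg (fun he => h p List.mem_cons_self he.symm),
      ih (fun q hq => h q (List.mem_cons_of_mem _ hq))]
    omega

lemma sum_if_key_eq (l : List ((Int × Int) × Int)) (x : Int × Int) (v : Int)
    (hn : (l.map (·.1)).Nodup) (hm : (x, v) ∈ l) :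
    (l.map (fun p => if x = p.1 then p.2 else 0)).sum = v := by
  induction l with
  | nil => cases hm
  | cons p l ih =>
    rw [List.map_cons, List.nodup_cons] at hn
    rw [List.map_cons, List.sum_cons]
    rcases List.mem_cons.mp hm with h | h
    · rw [← h]
      rw [if_pos rfl, sum_if_key_zero l x
        (fun q hq he => hn.1 (h ▸ List.mem_map.mpr ⟨q, hq, he⟩)), add_zero]
    · rw [if_neg (fun he => hn.1 (List.mem_map.mpr ⟨(x, v), h, by simpa using he⟩)), ih hn.2 h]
      omega

lemma sum_items_pick (d : PySem.Dict (Int × Int) Int) (hn : d.keys.Nodup) (x : Int × Int) :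
    (d.items.map (fun p => if x = p.1 then p.2 else 0)).sum = d.getD x 0 := by
  by_cases hc : d.contains x
  · have hv : ∃ v, d.get? x = some v := by
      rw [PySem.Dict.contains_eq_isSome_get?] at hc
      exact Option.isSome_iff_exists.mp hc
    obtain ⟨v, hv⟩ := hv
    rw [PySem.Dict.getD_of_get?_eq_some d 0 hv]
    exact sum_if_key_eq d.items x v (by simpa [PySem.Dict.keys] using hn)
      (PySem.Dict.mem_items_of_get?_eq_some d hv)
  · rw [PySem.Dict.getD_of_not_contains d 0 (by simpa using hc)]
    refine sum_if_key_zero d.items x (fun p hp he => hc ?_)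
    rw [PySem.Dict.contains_iff_mem_keys]
    rw [← he]
    exact PySem.Dict.mem_keys_of_mem_items d hp

-- the item loop of kSumStep adds each state's count to its one or two successor states
lemma foldItems (k target a : Int) (l : List ((Int × Int) × Int)) :
    ∀ (nxt : PySem.Dict (Int × Int) Int) (s : Int × Int),
      ((l.foldl (fun nxt p =>
          let nxt1 := nxt.insert (p.1.1, p.1.2) (nxt.getD (p.1.1, p.1.2) 0 + p.2)
          if p.1.1 + 1 ≤ k ∧ 0 ≤ p.1.2 + a ∧ p.1.2 + a ≤ target then
            nxt1.insert (p.1.1 + 1, p.1.2 + a) (nxt1.getD (p.1.1 + 1, p.1.2 + a) 0 + p.2)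
          else nxt1) nxt).getD s 0)
      = nxt.getD s 0
        + (l.map (fun p => (if s = p.1 then p.2 else 0)
            + (if p.1.1 + 1 ≤ k ∧ 0 ≤ p.1.2 + a ∧ p.1.2 + a ≤ target ∧ s = (p.1.1 + 1, p.1.2 + a)
               then p.2 else 0))).sum := by
  induction l with
  | nil => intro nxt s; simp
  | cons p l ih =>
    intro nxt s
    obtain ⟨⟨pj, pt⟩, pc⟩ := p
    rw [List.foldl_cons, List.map_cons, List.sum_cons]
    dsimp only
    rw [ih]
    by_cases hcond : pj + 1 ≤ k ∧ 0 ≤ pt + a ∧ pt + a ≤ target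
    · by_cases hs2 : s = ((pj + 1, pt + a) : Int × Int)
      · subst hs2
        have hne : ¬ ((pj + 1 : Int) = pj ∧ (pt + a : Int) = pt) := by omega
        simp [PySem.Dict.getD_insert, Prod.mk.injEq, hcond.1, hcond.2.1, hcond.2.2]
        omega
      · by_cases hs1 : s = ((pj, pt) : Int × Int)
        · subst hs1
          have hne2 : ¬ ((pj : Int) = pj + 1 ∧ (pt : Int) = pt + a) := by omega
          simp [PySem.Dict.getD_insert, Prod.mk.injEq, hcond.1, hcond.2.1, hcond.2.2]
          omega
        · simp [PySem.Dict.getD_insert, hcond.1, hcond.2.1, hcond.2.2, hs1, hs2]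
    · have hcond2 : ¬ (pj < k ∧ 0 ≤ pt + a ∧ pt + a ≤ target) :=
        fun h => hcond ⟨by omega, h.2⟩
      have hno : ¬ (pj < k ∧ 0 ≤ pt + a ∧ pt + a ≤ target ∧ s = ((pj + 1, pt + a) : Int × Int)) :=
        fun h => hcond ⟨by omega, h.2.1, h.2.2.1⟩
      by_cases hs1 : s = ((pj, pt) : Int × Int)
      · subst hs1
        have hno' : ¬ (pj < k ∧ 0 ≤ pt + a ∧ pt + a ≤ target ∧ ((pj, pt) : Int × Int) = (pj + 1, pt + a)) :=
          fun h => hcond ⟨by omega, h.2.1, h.2.2.1⟩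
        simp [hcond2]
        omega
      · simp [PySem.Dict.getD_insert, hcond2, hno, hs1]

lemma kSumStep_getD (k target a : Int) (cur : PySem.Dict (Int × Int) Int)
    (hn : cur.keys.Nodup) (j t : Int) :
    (kSumStep k target a cur).getD (j, t) 0
      = cur.getD (j, t) 0
        + (if j ≤ k ∧ 0 ≤ t ∧ t ≤ target then cur.getD (j - 1, t - a) 0 else 0) := by
  unfold kSumStep
  rw [foldItems, PySem.Dict.getD_empty, zero_add]
  have hsplit : ∀ (f g : (Int × Int) × Int → Int) (l : List ((Int × Int) × Int)),
      (l.map (fun p => f p + g p)).sum = (l.map f).sum + (l.map g).sum := by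
    intro f g l
    induction l with
    | nil => rfl
    | cons p l ih => simp only [List.map_cons, List.sum_cons, ih]; omega
  rw [hsplit, sum_items_pick cur hn (j, t)]
  congr 1
  have hfun : (fun p : (Int × Int) × Int =>
      if p.1.1 + 1 ≤ k ∧ 0 ≤ p.1.2 + a ∧ p.1.2 + a ≤ target ∧ (j, t) = (p.1.1 + 1, p.1.2 + a)
      then p.2 else 0)
      = (fun p : (Int × Int) × Int =>
          if j ≤ k ∧ 0 ≤ t ∧ t ≤ target then (if ((j - 1, t - a) : Int × Int) = p.1 then p.2 else 0)
          else 0) := by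
    funext p
    by_cases hC : j ≤ k ∧ 0 ≤ t ∧ t ≤ target
    · rw [if_pos hC]
      by_cases he : ((j - 1, t - a) : Int × Int) = p.1
      · have h1 : p.1.1 = j - 1 := by rw [← he]
        have h2 : p.1.2 = t - a := by rw [← he]
        rw [if_pos ⟨by omega, by omega, by omega, by
          obtain rfl : j = p.1.1 + 1 := by omega
          obtain rfl : t = p.1.2 + a := by omega
          rfl⟩, if_pos he]
      · rw [if_neg, if_neg he]
        rintro ⟨-, -, -, h4⟩
        exact he (by rw [Prod.ext_iff] at h4 ⊢; constructor <;> [skip; skip] <;> omega)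
    · rw [if_neg hC, if_neg]
      rintro ⟨h1, h2, h3, h4⟩
      rw [Prod.ext_iff] at h4
      exact hC ⟨by omega, by omega, by omega⟩
  rw [hfun]
  by_cases hC : j ≤ k ∧ 0 ≤ t ∧ t ≤ target
  · simp only [if_pos hC]
    exact sum_items_pick cur hn (j - 1, t - a)
  · simp only [if_neg hC]
    simp

lemma kSumStep_nodup (k target a : Int) (cur : PySem.Dict (Int × Int) Int) :
    (kSumStep k target a cur).keys.Nodup := by
  unfold kSumStep
  generalize cur.items = l
  have h : ∀ (nxt : PySem.Dict (Int × Int) Int), nxt.keys.Nodup →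
      (l.foldl (fun nxt p =>
          let nxt1 := nxt.insert (p.1.1, p.1.2) (nxt.getD (p.1.1, p.1.2) 0 + p.2)
          if p.1.1 + 1 ≤ k ∧ 0 ≤ p.1.2 + a ∧ p.1.2 + a ≤ target then
            nxt1.insert (p.1.1 + 1, p.1.2 + a) (nxt1.getD (p.1.1 + 1, p.1.2 + a) 0 + p.2)
          else nxt1) nxt).keys.Nodup := by
    induction l with
    | nil => intro nxt hn; exact hn
    | cons p l ih =>
      intro nxt hn
      rw [List.foldl_cons]
      refine ih _ ?_
      by_cases hc : p.1.1 + 1 ≤ k ∧ 0 ≤ p.1.2 + a ∧ p.1.2 + a ≤ target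
      · simp only [hc]
        exact PySem.Dict.nodup_keys_insert _ _ _ (PySem.Dict.nodup_keys_insert _ _ _ hn)
      · simp only [hc, if_false]
        exact PySem.Dict.nodup_keys_insert _ _ _ hn
  exact h PySem.Dict.empty (PySem.Dict.nodup_keys_empty)

-- B's dict over (j, t) states after processing the first i elements
lemma bFold (As : List Int) (k target : Int) :
    ∀ i : Nat, i ≤ As.length →
      (((As.take i).foldl (fun cur a => kSumStep k target a cur)
          (PySem.Dict.empty.insert (0, 0) 1)).keys.Nodup
      ∧ ∀ j t : Int,
          (((As.take i).foldl (fun cur a => kSumStep k target a cur)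
            (PySem.Dict.empty.insert (0, 0) 1)).getD (j, t) 0)
          = if j = 0 ∧ t = 0 then 1
            else if 0 ≤ j ∧ j ≤ k ∧ 0 ≤ t ∧ t ≤ target then kCount As target i j t else 0) := by
  intro i
  induction i with
  | zero =>
    intro _
    refine ⟨PySem.Dict.nodup_keys_insert _ _ _ PySem.Dict.nodup_keys_empty, ?_⟩
    intro j t
    rw [List.take_zero, List.foldl_nil, PySem.Dict.getD_insert]
    simp only [Prod.mk.injEq, PySem.Dict.getD_empty]
    by_cases h0 : j = 0 ∧ t = 0
    · rw [if_pos h0, if_pos h0]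
    · rw [if_neg h0, if_neg h0]
      by_cases hw : 0 ≤ j ∧ j ≤ k ∧ 0 ≤ t ∧ t ≤ target
      · rw [if_pos hw]
        simp only [kCount]
        rw [if_neg (by omega), if_neg (by tauto)]
      · rw [if_neg hw]
  | succ i ih =>
    intro hi
    have hlt : i < As.length := by omega
    obtain ⟨hn, hv⟩ := ih (by omega)
    have htake : As.take (i + 1) = As.take i ++ [As[i]] := by
      rw [List.take_add_one, List.getElem?_eq_getElem hlt]
      rfl
    rw [htake, List.foldl_append, List.foldl_cons, List.foldl_nil]
    refine ⟨kSumStep_nodup _ _ _ _, ?_⟩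
    intro j t
    rw [kSumStep_getD k target As[i] _ hn j t, hv j t, hv (j - 1) (t - As[i])]
    have hga : PySem.List.pyGetD As (i : Int) 0 = As[i] := by
      rw [PySem.List.pyGetD_natCast]
      exact List.getD_eq_getElem As 0 hlt
    by_cases h0 : j = 0 ∧ t = 0
    · obtain ⟨rfl, rfl⟩ := h0
      by_cases hc : (0 : Int) ≤ k ∧ (0 : Int) ≤ 0 ∧ (0 : Int) ≤ target
      · rw [if_pos hc,
            if_neg (show ¬((0 : Int) - 1 = 0 ∧ (0 : Int) - As[i] = 0) by omega),
            if_neg (show ¬((0 : Int) ≤ 0 - 1 ∧ (0 : Int) - 1 ≤ k ∧ (0 : Int) ≤ 0 - As[i] ∧ (0 : Int) - As[i] ≤ target) by omega),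
            if_pos (show (0 : Int) = 0 ∧ (0 : Int) = 0 from ⟨rfl, rfl⟩),
            if_pos (show (0 : Int) = 0 ∧ (0 : Int) = 0 from ⟨rfl, rfl⟩)]
        omega
      · rw [if_neg hc, if_pos (show (0 : Int) = 0 ∧ (0 : Int) = 0 from ⟨rfl, rfl⟩),
            if_pos (show (0 : Int) = 0 ∧ (0 : Int) = 0 from ⟨rfl, rfl⟩)]
        omega
    · rw [if_neg h0, if_neg h0]
      by_cases hw : 0 ≤ j ∧ j ≤ k ∧ 0 ≤ t ∧ t ≤ target
      · rw [if_pos hw, if_pos ⟨hw.2.1, hw.2.2.1, hw.2.2.2⟩, if_pos hw]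
        simp only [kCount]
        rw [if_neg (show ¬(j < 0 ∨ t < 0 ∨ target < t) by omega), hga]
        congr 1
        by_cases hz : j - 1 = 0 ∧ t - As[i] = 0
        · rw [if_pos hz, hz.1, hz.2]
          exact (kCount_zero_zero As target (by omega) i).symm
        · rw [if_neg hz]
          by_cases hw2 : 0 ≤ j - 1 ∧ j - 1 ≤ k ∧ 0 ≤ t - As[i] ∧ t - As[i] ≤ target
          · rw [if_pos hw2]
          · rw [if_neg hw2]
            exact (kCount_guard As target i _ _ (by omega)).symm
      · rw [if_neg hw, if_neg hw]
        by_cases hc : j ≤ k ∧ 0 ≤ t ∧ t ≤ target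
        · rw [if_pos hc,
              if_neg (show ¬(j - 1 = 0 ∧ t - As[i] = 0) by omega),
              if_neg (show ¬(0 ≤ j - 1 ∧ j - 1 ≤ k ∧ 0 ≤ t - As[i] ∧ t - As[i] ≤ target) by omega)]
          omega
        · rw [if_neg hc]
          omega

-- what B's port returns, in terms of kCount
lemma kSum_alt_eq (A : List Int) (k target : Int) :
    kSum_alt A k target
      = (if k = 0 ∧ target = 0 then 1
         else if 0 ≤ k ∧ k ≤ k ∧ 0 ≤ target ∧ target ≤ target then
           kCount (PySem.List.sorted A (fun x => x) false) target
             (PySem.List.sorted A (fun x => x) false).length k target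
         else 0) := by
  simp only [kSum_alt]
  have h := (bFold (PySem.List.sorted A (fun x => x) false) k target
    (PySem.List.sorted A (fun x => x) false).length le_rfl).2 k target
  rw [List.take_length] at h
  exact h

-- both closed forms agree
lemma final_bridge (As : List Int) (k target : Int) :
    Val As k target As.length ((As.length : Int)) k target
      = (if k = 0 ∧ target = 0 then 1
         else if 0 ≤ k ∧ k ≤ k ∧ 0 ≤ target ∧ target ≤ target then
           kCount As target As.length k target
         else 0) := by
  unfold Val
  by_cases h0 : k = 0 ∧ target = 0
  · obtain ⟨rfl, rfl⟩ := h0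
    rw [if_pos (⟨rfl, rfl⟩ : (0 : Int) = 0 ∧ (0 : Int) = 0)]
    by_cases hn : ((As.length : Int)) = 0
    · rw [if_pos ⟨hn, rfl, rfl⟩]
    · rw [if_neg (by tauto), if_pos (by omega)]
      rw [Int.toNat_natCast]
      exact kCount_zero_zero As 0 le_rfl As.length
  · rw [if_neg (by rintro ⟨-, h1, h2⟩; exact h0 ⟨h1, h2⟩), if_neg h0]
    by_cases hw : 0 ≤ k ∧ k ≤ k ∧ 0 ≤ target ∧ target ≤ target
    · rw [if_pos hw]
      by_cases hn1 : 1 ≤ ((As.length : Int))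
      · by_cases hkn : k ≤ ((As.length : Int))
        · rw [if_pos (by omega), Int.toNat_natCast]
        · rw [if_neg (by omega)]
          exact (kCount_eq_zero_of_lt As target As.length k target (by omega)).symm
      · rw [if_neg (by omega)]
        have hn0 : As.length = 0 := by omega
        rw [hn0]
        simp only [kCount]
        rw [if_neg (by omega), if_neg (by tauto)]
    · rw [if_neg hw, if_neg (by omega)]

-- ===== VERDICT (by name: the statement is the Claim_ definition above) =====
theorem kSum_spec : Claim_equal_kSum := by
  intro A k target _
  unfold Spec_kSum
  rw [kSum_eq, kSum_alt_eq, final_bridge]
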